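-- pv_equiv track=rewrite | github.com/nadamur/VidatronArchive | ai/test_ui.py | _reminder_stick_action
-- ===== SOURCE A (Python) =====
-- def _reminder_stick_action(reminder: dict) -> str:
--     """Map a reminder to a stick-figure animation id."""
--     a = (reminder.get("action") or "").strip().lower()
--     if a in ("drink", "stretch", "walk", "think", "wave"):
--         return a
--     t = (reminder.get("text") or "").lower()
--     ip = (reminder.get("icon_path") or "").lower()
--     if "drink" in t or "water" in t or "hydrat" in t or "drink_water" in ip:
--         return "drink"
--     if any(k in t for k in ("grateful", "gratitude", "reflect", "thankful", "think about")):
--         return "think"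
--     if any(k in t for k in ("short break", "walk", "stroll", "step away")):
--         return "walk"
--     if (
--         "stretch" in t
--         or "yoga" in t
--         or any(k in t for k in ("stand", "break", "exercise", "jog"))
--         or "get up" in t
--     ):
--         return "stretch"
--     if "stretch" in ip or "stretch.png" in ip:
--         return "stretch"
--     if "drink" in ip or "water" in ip:
--         return "drink"
--     return "wave"
-- ===== SOURCE B (Python) =====
-- # Flat keyword table: (rank, field, substring).  A match's rank is its
-- # priority; the answer is the animation of the LOWEST matched rank.
-- _KEYWORDS = (
--     (0, "text", "drink"), (0, "text", "water"), (0, "text", "hydrat"),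
--     (0, "icon_path", "drink_water"),
--     (1, "text", "grateful"), (1, "text", "gratitude"), (1, "text", "reflect"),
--     (1, "text", "thankful"), (1, "text", "think about"),
--     (2, "text", "short break"), (2, "text", "walk"), (2, "text", "stroll"),
--     (2, "text", "step away"),
--     (3, "text", "stretch"), (3, "text", "yoga"), (3, "text", "stand"),
--     (3, "text", "break"), (3, "text", "exercise"), (3, "text", "jog"),
--     (3, "text", "get up"),
--     (4, "icon_path", "stretch"), (4, "icon_path", "stretch.png"),
--     (5, "icon_path", "drink"), (5, "icon_path", "water"),
-- )
-- # Animation per rank; the last entry is the default when nothing matches.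
-- _RESULTS = ("drink", "think", "walk", "stretch", "stretch", "drink", "wave")
--
--
-- def _reminder_stick_action(reminder: dict) -> str:
--     """Map a reminder to a stick-figure animation id."""
--     a = (reminder.get("action") or "").strip().lower()
--     if a in {"drink", "stretch", "walk", "think", "wave"}:
--         return a
--     text = (reminder.get("text") or "").lower()
--     icon = (reminder.get("icon_path") or "").lower()
--     best = min((rank for rank, field, sub in _KEYWORDS
--                 if sub in (text if field == "text" else icon)),
--                default=len(_RESULTS) - 1)
--     return _RESULTS[best]
-- ===== Notes on version B (the rewrite author's own statement) =====
-- stated objective: alternative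
-- what changed: Instead of A's ordered chain of keyword branches with early return, B collects the ranks of ALL matching (field, substring) entries from one flat keyword table and returns the animation of the minimum matched rank (min with a sentinel default), which is correct because within a rank all entries map to one animation and A returns the lowest-ranked matching group.
import Mathlib
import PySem

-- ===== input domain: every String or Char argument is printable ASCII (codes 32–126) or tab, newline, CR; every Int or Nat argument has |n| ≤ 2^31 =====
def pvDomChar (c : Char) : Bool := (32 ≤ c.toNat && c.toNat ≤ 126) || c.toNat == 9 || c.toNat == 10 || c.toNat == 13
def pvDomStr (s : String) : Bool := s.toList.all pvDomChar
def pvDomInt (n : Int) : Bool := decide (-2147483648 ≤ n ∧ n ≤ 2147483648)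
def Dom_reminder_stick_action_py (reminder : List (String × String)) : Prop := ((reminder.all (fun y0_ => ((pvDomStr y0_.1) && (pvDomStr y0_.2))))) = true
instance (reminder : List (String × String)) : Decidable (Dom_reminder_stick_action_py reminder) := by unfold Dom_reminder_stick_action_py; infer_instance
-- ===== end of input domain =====

-- B replaces A's ordered branch chain by a min-over-matched-ranks computation over one flat keyword table (same cost; objective: alternative).

-- ===== PORT A =====
def reminder_stick_action_py (reminder : List (String × String)) : String :=
  let d := PySem.Dict.mk reminder
  let a := PySem.Str.lower (PySem.Str.strip (PySem.Dict.getD d "action" ""))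
  if a = "drink" ∨ a = "stretch" ∨ a = "walk" ∨ a = "think" ∨ a = "wave" then a
  else
    let t := PySem.Str.lower (PySem.Dict.getD d "text" "")
    let ip := PySem.Str.lower (PySem.Dict.getD d "icon_path" "")
    if PySem.Str.isIn "drink" t || PySem.Str.isIn "water" t || PySem.Str.isIn "hydrat" t
        || PySem.Str.isIn "drink_water" ip then "drink"
    else if (["grateful", "gratitude", "reflect", "thankful", "think about"] : List String).any
        (fun k => PySem.Str.isIn k t) then "think"
    else if (["short break", "walk", "stroll", "step away"] : List String).any
        (fun k => PySem.Str.isIn k t) then "walk"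
    else if PySem.Str.isIn "stretch" t || PySem.Str.isIn "yoga" t
        || (["stand", "break", "exercise", "jog"] : List String).any (fun k => PySem.Str.isIn k t)
        || PySem.Str.isIn "get up" t then "stretch"
    else if PySem.Str.isIn "stretch" ip || PySem.Str.isIn "stretch.png" ip then "stretch"
    else if PySem.Str.isIn "drink" ip || PySem.Str.isIn "water" ip then "drink"
    else "wave"

-- ===== PORT B =====
def pvAltKeywords : List (Nat × String × String) :=
  [(0, "text", "drink"), (0, "text", "water"), (0, "text", "hydrat"),
   (0, "icon_path", "drink_water"),
   (1, "text", "grateful"), (1, "text", "gratitude"), (1, "text", "reflect"),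
   (1, "text", "thankful"), (1, "text", "think about"),
   (2, "text", "short break"), (2, "text", "walk"), (2, "text", "stroll"),
   (2, "text", "step away"),
   (3, "text", "stretch"), (3, "text", "yoga"), (3, "text", "stand"),
   (3, "text", "break"), (3, "text", "exercise"), (3, "text", "jog"),
   (3, "text", "get up"),
   (4, "icon_path", "stretch"), (4, "icon_path", "stretch.png"),
   (5, "icon_path", "drink"), (5, "icon_path", "water")]

def pvAltResults : List String :=
  ["drink", "think", "walk", "stretch", "stretch", "drink", "wave"]

def reminder_stick_action_py_alt (reminder : List (String × String)) : String :=
  let d := PySem.Dict.mk reminder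
  let a := PySem.Str.lower (PySem.Str.strip (PySem.Dict.getD d "action" ""))
  if (PySem.Set.ofList ["drink", "stretch", "walk", "think", "wave"]).contains a then a
  else
    let t := PySem.Str.lower (PySem.Dict.getD d "text" "")
    let ip := PySem.Str.lower (PySem.Dict.getD d "icon_path" "")
    -- min(generator of matching ranks, default = len(_RESULTS)-1)
    let best := (pvAltKeywords.filterMap (fun k =>
        if PySem.Str.isIn k.2.2 (if k.2.1 = "text" then t else ip) then some k.1 else none)).foldl
      Nat.min (pvAltResults.length - 1)
    pvAltResults.getD best "wave"

-- ===== PRECONDITION & SPEC =====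
def Spec_reminder_stick_action_py (reminder : List (String × String)) (out : String) : Prop := out = reminder_stick_action_py_alt reminder
instance (reminder : List (String × String)) (out : String) : Decidable (Spec_reminder_stick_action_py reminder out) := by unfold Spec_reminder_stick_action_py; infer_instance

-- ===== CLAIM (what is proved, stated in full; the proofs are below) =====
def Claim_equal_reminder_stick_action_py : Prop := ∀ (reminder : List (String × String)), Dom_reminder_stick_action_py reminder → Spec_reminder_stick_action_py reminder (reminder_stick_action_py reminder)

-- ===== LEMMAS AND PROOFS =====
theorem pvContains_ofList_five (a : String) :
    (PySem.Set.ofList ["drink", "stretch", "walk", "think", "wave"]).contains a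
      = decide (a = "drink" ∨ a = "stretch" ∨ a = "walk" ∨ a = "think" ∨ a = "wave") := by
  simp [PySem.Set.ofList, PySem.Set.add, PySem.Set.contains]

-- appended below CLAIM in equiv.lean
def pvStep (c : Bool) (p a : Nat) : Nat := if c then Nat.min a p else a

theorem pvStep_merge (ca cb : Bool) (p a : Nat) :
    pvStep cb p (pvStep ca p a) = pvStep (ca || cb) p a := by
  cases ca <;> cases cb <;> simp [pvStep]

theorem pvFoldl_filterMap_min (t ip : String) (l : List (Nat × String × String)) (acc : Nat) :
    (l.filterMap (fun k =>
        if PySem.Str.isIn k.2.2 (if k.2.1 = "text" then t else ip) then some k.1 else none)).foldl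
      Nat.min acc
    = l.foldl (fun a k => pvStep (PySem.Str.isIn k.2.2 (if k.2.1 = "text" then t else ip)) k.1 a) acc := by
  induction l generalizing acc with
  | nil => rfl
  | cons x xs ih =>
      cases h : PySem.Chars.isIn x.2.2.toList (if x.2.1 = "text" then t else ip).toList <;>
        (simp [h, pvStep]; exact ih _)

theorem pvAltResults_len : pvAltResults.length - 1 = 6 := rfl

theorem pvGetD_char (C0 C1 C2 C3 C4 C5 : Bool) :
    pvAltResults.getD (pvStep C5 5 (pvStep C4 4 (pvStep C3 3 (pvStep C2 2
        (pvStep C1 1 (pvStep C0 0 6)))))) "wave"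
    = if C0 then "drink" else if C1 then "think" else if C2 then "walk"
      else if C3 then "stretch" else if C4 then "stretch" else if C5 then "drink" else "wave" := by
  cases C0 <;> cases C1 <;> cases C2 <;> cases C3 <;> cases C4 <;> cases C5 <;> rfl

set_option maxHeartbeats 2000000 in
theorem reminder_stick_action_py_spec : Claim_equal_reminder_stick_action_py := by
  intro reminder _
  show _ = _
  unfold reminder_stick_action_py reminder_stick_action_py_alt
  simp only [pvContains_ofList_five, decide_eq_true_eq, pvAltResults_len,
    pvFoldl_filterMap_min, pvAltKeywords, List.foldl, String.reduceEq, reduceIte,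
    pvStep_merge, pvGetD_char, List.any, Bool.or_assoc, Bool.or_false]
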